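-- pv_equiv track=rewrite | github.com/zibochen6/personal_scripts_repository | video-subtitle-extractor/extractor/youtube_extractor.py | _pick_best_format
-- ===== SOURCE A (Python) =====
-- from typing import Any, Iterable, Sequence
--
-- def _pick_best_format(entries: Sequence[dict[str, Any]]) -> dict[str, str] | None:
--     """Choose a preferred subtitle serialization format."""
--
--     ordered_formats = ["srv3", "json3", "vtt", "ttml", "srv2", "srv1"]
--     for subtitle_format in ordered_formats:
--         for entry in entries:
--             format_name = str(entry.get("ext") or entry.get("format_id") or "")
--             if format_name != subtitle_format:
--                 continue
--             url = entry.get("url")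
--             if url:
--                 return {"url": str(url), "format": subtitle_format}
--     for entry in entries:
--         url = entry.get("url")
--         if url:
--             format_name = str(entry.get("ext") or entry.get("format_id") or "unknown")
--             return {"url": str(url), "format": format_name}
--     return None
-- ===== SOURCE B (Python) =====
-- def _pick_best_format(entries):
--     """Choose a preferred subtitle serialization format."""
--     ordered_formats = ["srv3", "json3", "vtt", "ttml", "srv2", "srv1"]
--     index = {}
--     fallback = None
--     for entry in entries:
--         url = entry.get("url")
--         if not url:
--             continue
--         format_name = str(entry.get("ext") or entry.get("format_id") or "")
--         if format_name not in index:
--             index[format_name] = {"url": str(url), "format": format_name}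
--         if fallback is None:
--             fallback = {"url": str(url),
--                         "format": str(entry.get("ext") or entry.get("format_id") or "unknown")}
--     for subtitle_format in ordered_formats:
--         if subtitle_format in index:
--             return index[subtitle_format]
--     return fallback
-- ===== Notes on version B (the rewrite author's own statement) =====
-- stated objective: alternative
-- what changed: B replaces A's per-priority-format re-scan of all entries (and a separate fallback scan) with a single pass that builds a first-occurrence index keyed by format name plus the first url-bearing fallback, then looks up the 6 priority formats in the index.
import Mathlib
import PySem

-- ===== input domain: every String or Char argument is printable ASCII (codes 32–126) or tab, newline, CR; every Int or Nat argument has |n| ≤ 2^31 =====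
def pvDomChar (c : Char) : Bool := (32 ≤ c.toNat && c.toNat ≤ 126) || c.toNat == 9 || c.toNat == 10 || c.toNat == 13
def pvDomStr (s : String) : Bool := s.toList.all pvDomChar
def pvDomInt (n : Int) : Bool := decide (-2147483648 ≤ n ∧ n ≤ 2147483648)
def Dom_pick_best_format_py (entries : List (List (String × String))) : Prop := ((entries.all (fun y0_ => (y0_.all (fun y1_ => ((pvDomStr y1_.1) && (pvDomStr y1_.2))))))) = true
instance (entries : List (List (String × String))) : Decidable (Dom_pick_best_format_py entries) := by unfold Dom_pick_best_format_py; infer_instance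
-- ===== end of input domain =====

-- B makes ONE pass over entries, building a first-occurrence index keyed by format name
-- (url-truthy entries only) plus the first url-bearing fallback, then scans the priority
-- list over the index — replacing A's re-scan of all entries per priority format (alternative decomposition).

-- ===== PORT A =====
-- entry.get(k): first-match association-list lookup (dict convention)
def pvEget (e : List (String × String)) (k : String) : Option String :=
  (PySem.Dict.mk e).get? k

-- str(entry.get("ext") or entry.get("format_id") or dflt), dflt a string literal
def pvFmtName (e : List (String × String)) (dflt : String) : String :=
  match pvEget e "ext" with
  | some a => if a ≠ "" then a else
      match pvEget e "format_id" with
      | some b => if b ≠ "" then b else dflt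
      | none => dflt
  | none =>
      match pvEget e "format_id" with
      | some b => if b ≠ "" then b else dflt
      | none => dflt

-- inner loop of A for one subtitle_format
def pickA_inner (f : String) : List (List (String × String)) → Option (List (String × String))
  | [] => none
  | e :: rest =>
      if pvFmtName e "" ≠ f then pickA_inner f rest
      else
        match pvEget e "url" with
        | some u => if u ≠ "" then some [("url", u), ("format", f)] else pickA_inner f rest
        | none => pickA_inner f rest

-- A's final fallback loop
def pickA_fallback : List (List (String × String)) → Option (List (String × String))
  | [] => none
  | e :: rest =>
      match pvEget e "url" with
      | some u => if u ≠ "" then some [("url", u), ("format", pvFmtName e "unknown")] else pickA_fallback rest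
      | none => pickA_fallback rest

-- A's outer loop over ordered_formats
def pickA_outer (entries : List (List (String × String))) : List String → Option (List (String × String))
  | [] => pickA_fallback entries
  | f :: fs =>
      match pickA_inner f entries with
      | some r => some r
      | none => pickA_outer entries fs

def pick_best_format_py (entries : List (List (String × String))) : Option (List (String × String)) :=
  pickA_outer entries ["srv3", "json3", "vtt", "ttml", "srv2", "srv1"]

-- ===== PORT B =====
-- one step of B's single pass: loop state is (index, fallback)
def pvStepB (st : PySem.Dict String (List (String × String)) × Option (List (String × String)))
    (e : List (String × String)) :
    PySem.Dict String (List (String × String)) × Option (List (String × String)) :=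
  match pvEget e "url" with
  | none => st
  | some u =>
      if u = "" then st
      else
        let fn := pvFmtName e ""
        let idx := if st.1.contains fn then st.1 else st.1.insert fn [("url", u), ("format", fn)]
        let fb := match st.2 with
                  | some _ => st.2
                  | none => some [("url", u), ("format", pvFmtName e "unknown")]
        (idx, fb)

-- B's final scan of the priority list over the index
def pickB_scan (idx : PySem.Dict String (List (String × String)))
    (fb : Option (List (String × String))) : List String → Option (List (String × String))
  | [] => fb
  | f :: fs =>
      match idx.get? f with
      | some r => some r
      | none => pickB_scan idx fb fs

def pick_best_format_py_alt (entries : List (List (String × String))) : Option (List (String × String)) :=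
  let st := entries.foldl pvStepB (PySem.Dict.empty, none)
  pickB_scan st.1 st.2 ["srv3", "json3", "vtt", "ttml", "srv2", "srv1"]

-- ===== PRECONDITION & SPEC =====
def Spec_pick_best_format_py (entries : List (List (String × String))) (out : Option (List (String × String))) : Prop := out = pick_best_format_py_alt entries
instance (entries : List (List (String × String))) (out : Option (List (String × String))) : Decidable (Spec_pick_best_format_py entries out) := by unfold Spec_pick_best_format_py; infer_instance

-- ===== CLAIM (what is proved, stated in full; the proofs are below) =====
def Claim_equal_pick_best_format_py : Prop := ∀ (entries : List (List (String × String))), Dom_pick_best_format_py entries → Spec_pick_best_format_py entries (pick_best_format_py entries)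

-- ===== LEMMAS AND PROOFS =====

-- Fold invariant: the index looked up at f is the state's value or else A's inner scan for f,
-- and the fallback slot is the state's or else A's fallback scan.
theorem pvFold_get? (entries : List (List (String × String)))
    (d : PySem.Dict String (List (String × String))) (fb : Option (List (String × String)))
    (f : String) :
    (entries.foldl pvStepB (d, fb)).1.get? f = (d.get? f).or (pickA_inner f entries) := by
  induction entries generalizing d fb with
  | nil => simp [pickA_inner]
  | cons e rest ih =>
      rw [List.foldl_cons]
      cases hu : pvEget e "url" with
      | none =>
          have hs : pvStepB (d, fb) e = (d, fb) := by simp [pvStepB, hu]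
          rw [hs, ih]
          congr 1
          simp [pickA_inner, hu]
      | some u =>
          by_cases hue : u = ""
          · have hs : pvStepB (d, fb) e = (d, fb) := by simp [pvStepB, hu, hue]
            rw [hs, ih]
            congr 1
            simp [pickA_inner, hu, hue]
          · by_cases hf : pvFmtName e "" = f
            · -- entry matches f with a truthy url
              have hinner : pickA_inner f (e :: rest) = some [("url", u), ("format", f)] := by
                simp [pickA_inner, hu, hf, hue]
              rw [hinner]
              by_cases hc : d.contains (pvFmtName e "") = true
              · have hs : pvStepB (d, fb) e = (d,
                    match fb with
                    | some _ => fb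
                    | none => some [("url", u), ("format", pvFmtName e "unknown")]) := by
                  simp [pvStepB, hu, hue, hc]
                rw [hs, ih]
                rw [PySem.Dict.contains_eq_isSome_get?, hf] at hc
                cases hd : d.get? f with
                | some v => simp [Option.or]
                | none => rw [hd] at hc; simp at hc
              · have hs : pvStepB (d, fb) e =
                    (d.insert (pvFmtName e "") [("url", u), ("format", pvFmtName e "")],
                    match fb with
                    | some _ => fb
                    | none => some [("url", u), ("format", pvFmtName e "unknown")]) := by
                  simp [pvStepB, hu, hue, hc]
                rw [hs, ih, hf, PySem.Dict.get?_insert_self]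
                rw [PySem.Dict.contains_eq_isSome_get?, hf] at hc
                have hd : d.get? f = none := by
                  cases h : d.get? f with
                  | none => rfl
                  | some v => rw [h] at hc; simp at hc
                rw [hd]
                simp [Option.or]
            · -- entry's format differs from f
              have hinner : pickA_inner f (e :: rest) = pickA_inner f rest := by
                simp [pickA_inner, hf]
              rw [hinner]
              by_cases hc : d.contains (pvFmtName e "") = true
              · have hs : pvStepB (d, fb) e = (d,
                    match fb with
                    | some _ => fb
                    | none => some [("url", u), ("format", pvFmtName e "unknown")]) := by
                  simp [pvStepB, hu, hue, hc]
                rw [hs, ih]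
              · have hs : pvStepB (d, fb) e =
                    (d.insert (pvFmtName e "") [("url", u), ("format", pvFmtName e "")],
                    match fb with
                    | some _ => fb
                    | none => some [("url", u), ("format", pvFmtName e "unknown")]) := by
                  simp [pvStepB, hu, hue, hc]
                have hne : f ≠ pvFmtName e "" := fun h => hf h.symm
                rw [hs, ih, PySem.Dict.get?_insert_of_ne d _ hne]

theorem pvFold_fb (entries : List (List (String × String)))
    (d : PySem.Dict String (List (String × String))) (fb : Option (List (String × String)))  :
    (entries.foldl pvStepB (d, fb)).2 = fb.or (pickA_fallback entries) := by
  induction entries generalizing d fb with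
  | nil => simp [pickA_fallback]
  | cons e rest ih =>
      rw [List.foldl_cons]
      cases hu : pvEget e "url" with
      | none =>
          have hs : pvStepB (d, fb) e = (d, fb) := by simp [pvStepB, hu]
          rw [hs, ih]
          congr 1
          simp [pickA_fallback, hu]
      | some u =>
          by_cases hue : u = ""
          · have hs : pvStepB (d, fb) e = (d, fb) := by simp [pvStepB, hu, hue]
            rw [hs, ih]
            congr 1
            simp [pickA_fallback, hu, hue]
          · have hfall : pickA_fallback (e :: rest) =
                some [("url", u), ("format", pvFmtName e "unknown")] := by
              simp [pickA_fallback, hu, hue]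
            have hs : (pvStepB (d, fb) e).2 =
                (match fb with
                 | some _ => fb
                 | none => some [("url", u), ("format", pvFmtName e "unknown")]) := by
              simp only [pvStepB, hu]
              rw [if_neg hue]
            have : (List.foldl pvStepB (pvStepB (d, fb) e) rest).2 =
                ((pvStepB (d, fb) e).2).or (pickA_fallback rest) := by
              rw [← ih (pvStepB (d, fb) e).1 (pvStepB (d, fb) e).2]
            rw [this, hs, hfall]
            cases fb <;> simp [Option.or]

theorem pvScan_eq (entries : List (List (String × String))) (fmts : List String)
    (idx : PySem.Dict String (List (String × String))) (fb : Option (List (String × String)))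
    (hidx : ∀ f, idx.get? f = pickA_inner f entries)
    (hfb : fb = pickA_fallback entries) :
    pickB_scan idx fb fmts = pickA_outer entries fmts := by
  induction fmts with
  | nil => simpa [pickB_scan, pickA_outer]
  | cons f fs ih =>
      simp only [pickB_scan, pickA_outer, hidx f]
      cases pickA_inner f entries <;> simp [ih]

-- ===== VERDICT (by name: the statement is the Claim_ definition above) =====
theorem pick_best_format_py_spec : Claim_equal_pick_best_format_py := by
  intro entries _
  unfold Spec_pick_best_format_py pick_best_format_py pick_best_format_py_alt
  refine (pvScan_eq entries _ _ _ ?_ ?_).symm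
  · intro f
    rw [pvFold_get? entries PySem.Dict.empty none f]
    simp [PySem.Dict.get?_empty, Option.or]
  · rw [pvFold_fb entries PySem.Dict.empty none]
    rfl
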